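-- pv_equiv track=rewrite | github.com/KilroyHere/sudoku-saga | strategies/pointing_pairs.py | _cells_share_unit
-- ===== SOURCE A (Python) =====
-- from typing import List, Set, Tuple
--
-- def _cells_share_unit(cells: List[Tuple[int, int]]) -> Tuple[bool, str, int]:
--     """Check if cells share a row or column."""
--     if not cells:
--         return False, "", -1
--
--     rows = {row for row, _ in cells}
--     cols = {col for _, col in cells}
--
--     if len(rows) == 1:
--         return True, "row", next(iter(rows))
--     if len(cols) == 1:
--         return True, "column", next(iter(cols))
--
--     return False, "", -1
-- ===== SOURCE B (Python) =====
-- def _cells_share_unit(cells):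
--     """Check if cells share a row or column."""
--     if not cells:
--         return False, "", -1
--     r0, c0 = cells[0]
--     rmin = rmax = r0
--     cmin = cmax = c0
--     for r, c in cells[1:]:
--         if r < rmin: rmin = r
--         if r > rmax: rmax = r
--         if c < cmin: cmin = c
--         if c > cmax: cmax = c
--     if rmin == rmax:
--         return True, "row", rmin
--     if cmin == cmax:
--         return True, "column", cmin
--     return False, "", -1
-- ===== Notes on version B (the rewrite author's own statement) =====
-- stated objective: alternative
-- what changed: Replaces the two distinct-value set constructions with a single pass maintaining the running min and max of row and column coordinates; 'all cells share a row/column' becomes 'min == max' of that coordinate.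
import Mathlib
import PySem

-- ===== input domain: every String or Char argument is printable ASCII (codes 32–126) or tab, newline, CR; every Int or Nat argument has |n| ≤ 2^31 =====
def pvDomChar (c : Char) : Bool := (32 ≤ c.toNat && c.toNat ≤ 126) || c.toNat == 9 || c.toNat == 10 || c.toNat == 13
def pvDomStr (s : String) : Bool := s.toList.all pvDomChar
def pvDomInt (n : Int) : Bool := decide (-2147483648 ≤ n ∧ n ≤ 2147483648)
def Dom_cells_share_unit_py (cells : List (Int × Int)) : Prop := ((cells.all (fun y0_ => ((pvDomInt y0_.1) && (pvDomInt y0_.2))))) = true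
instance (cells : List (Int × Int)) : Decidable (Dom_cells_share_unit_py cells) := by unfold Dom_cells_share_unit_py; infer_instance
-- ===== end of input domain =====

-- B replaces A's two distinct-value sets by a single min/max-tracking pass ('alternative', same O(n) cost).

-- ===== PORT A =====
-- A: builds the distinct-row and distinct-column sets and tests their sizes.
-- next(iter(s)) on a singleton set is its unique element; ported as headD 0 (order-independent there).
def cells_share_unit_py (cells : List (Int × Int)) : Bool × String × Int :=
  if cells = [] then (false, "", -1)
  else
    let rows : PySem.Set Int := PySem.Set.ofList (cells.map (fun p => p.1))
    let cols : PySem.Set Int := PySem.Set.ofList (cells.map (fun p => p.2))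
    if PySem.Set.len rows = 1 then (true, "row", rows.headD 0)
    else if PySem.Set.len cols = 1 then (true, "column", cols.headD 0)
    else (false, "", -1)

-- ===== PORT B =====
-- B: one loop over the tail updating (rmin, rmax) and (cmin, cmax); shared row/column iff min = max.
def pvScanMM (rs cs : Int × Int) : List (Int × Int) → (Int × Int) × (Int × Int)
  | [] => (rs, cs)
  | (r, c) :: t =>
    pvScanMM (if r < rs.1 then r else rs.1, if r > rs.2 then r else rs.2)
             (if c < cs.1 then c else cs.1, if c > cs.2 then c else cs.2) t

def cells_share_unit_py_alt (cells : List (Int × Int)) : Bool × String × Int :=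
  match cells with
  | [] => (false, "", -1)
  | (r0, c0) :: rest =>
    let mm := pvScanMM (r0, r0) (c0, c0) rest
    if mm.1.1 == mm.1.2 then (true, "row", mm.1.1)
    else if mm.2.1 == mm.2.2 then (true, "column", mm.2.1)
    else (false, "", -1)

-- ===== PRECONDITION & SPEC =====
def Spec_cells_share_unit_py (cells : List (Int × Int)) (out : Bool × String × Int) : Prop := out = cells_share_unit_py_alt cells
instance (cells : List (Int × Int)) (out : Bool × String × Int) : Decidable (Spec_cells_share_unit_py cells out) := by unfold Spec_cells_share_unit_py; infer_instance

-- ===== CLAIM (what is proved, stated in full; the proofs are below) =====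
def Claim_equal_cells_share_unit_py : Prop := ∀ (cells : List (Int × Int)), Dom_cells_share_unit_py cells → Spec_cells_share_unit_py cells (cells_share_unit_py cells)

-- ===== LEMMAS AND PROOFS =====

-- scalar min/max fold on one coordinate list
def pvMM (m M : Int) : List Int → Int × Int
  | [] => (m, M)
  | x :: t => pvMM (if x < m then x else m) (if x > M then x else M) t

theorem pvScanMM_eq (t : List (Int × Int)) : ∀ rs cs,
    pvScanMM rs cs t = (pvMM rs.1 rs.2 (t.map Prod.fst), pvMM cs.1 cs.2 (t.map Prod.snd)) := by
  induction t with
  | nil => intro rs cs; rfl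
  | cons p t ih =>
    intro rs cs
    obtain ⟨r, c⟩ := p
    simp only [pvScanMM, List.map_cons, pvMM, ih]

theorem pvMM_eq_iff (xs : List Int) : ∀ m M, m ≤ M →
    (((pvMM m M xs).1 = (pvMM m M xs).2) ↔ (m = M ∧ ∀ x ∈ xs, x = m)) := by
  induction xs with
  | nil => intro m M _; simp [pvMM]
  | cons x t ih =>
    intro m M hmM
    have hle : (if x < m then x else m) ≤ (if x > M then x else M) := by
      split_ifs <;> omega
    have ihx := ih _ _ hle
    simp only [pvMM, ihx, List.mem_cons]
    constructor
    · rintro ⟨h1, h2⟩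
      have hm : m = M ∧ x = m := by split_ifs at h1 <;> omega
      refine ⟨hm.1, fun y hy => ?_⟩
      rcases hy with rfl | hy
      · exact hm.2
      · have := h2 y hy
        split_ifs at this <;> omega
    · rintro ⟨rfl, hall⟩
      have hx : x = m := hall x (Or.inl rfl)
      have hif1 : (if x < m then x else m) = m := by omega
      have hif2 : (if x > m then x else m) = m := by omega
      rw [hif1, hif2]
      exact ⟨rfl, fun y hy => hall y (Or.inr hy)⟩

theorem pvMM_const (xs : List Int) : ∀ m, (∀ x ∈ xs, x = m) → pvMM m m xs = (m, m) := by
  induction xs with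
  | nil => intro m _; rfl
  | cons x t ih =>
    intro m h
    have hx : x = m := h x (List.mem_cons_self)
    simp only [pvMM, hx, lt_irrefl, gt_iff_lt, if_false]
    exact ih m (fun y hy => h y (List.mem_cons_of_mem _ hy))

-- a Python set built from a nonempty list is the singleton [a] iff every element equals a
theorem pv_ofList_eq_single (a : Int) (xs : List Int) (h : ∀ x ∈ a :: xs, x = a) :
    PySem.Set.ofList (a :: xs) = [a] := by
  have hnd : (PySem.Set.ofList (a :: xs)).Nodup := PySem.Set.nodup_ofList _
  have hmem : ∀ x, x ∈ PySem.Set.ofList (a :: xs) ↔ x ∈ a :: xs := by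
    intro x; exact PySem.Set.mem_ofList _ _
  have ha : a ∈ PySem.Set.ofList (a :: xs) := (hmem a).2 (List.mem_cons_self)
  match hs : PySem.Set.ofList (a :: xs) with
  | [] => rw [hs] at ha; cases ha
  | [x] =>
    have := h x ((hmem x).1 (by rw [hs]; exact List.mem_cons_self))
    simp [this]
  | x :: y :: t =>
    have hx : x = a := h x ((hmem x).1 (by rw [hs]; simp))
    have hy : y = a := h y ((hmem y).1 (by rw [hs]; simp))
    rw [hs] at hnd
    simp [hx, hy] at hnd

theorem pv_single_of_len_one (a : Int) (xs : List Int)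
    (h : (PySem.Set.ofList (a :: xs)).length = 1) : ∀ x ∈ a :: xs, x = a := by
  have ha : a ∈ PySem.Set.ofList (a :: xs) := (PySem.Set.mem_ofList _ _).2 (List.mem_cons_self)
  match hs : PySem.Set.ofList (a :: xs) with
  | [] => rw [hs] at ha; cases ha
  | [b] =>
    rw [hs] at ha; simp at ha
    intro x hx
    have : x ∈ PySem.Set.ofList (a :: xs) := (PySem.Set.mem_ofList _ _).2 hx
    rw [hs] at this; simp at this; omega
  | b :: c :: t => rw [hs] at h; simp at h

-- bridge for one coordinate: set length 1 ↔ every element of the tail equals the head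
theorem pv_len_one_iff (a : Int) (xs : List Int) :
    (PySem.Set.ofList (a :: xs)).length = 1 ↔ ∀ x ∈ xs, x = a := by
  constructor
  · intro h x hx
    exact pv_single_of_len_one a xs h x (List.mem_cons_of_mem _ hx)
  · intro h
    rw [pv_ofList_eq_single a xs (by
      intro x hx
      rcases List.mem_cons.1 hx with h1 | h1
      · exact h1
      · exact h x h1)]
    rfl

-- ===== VERDICT (by name: the statement is the Claim_ definition above) =====
theorem cells_share_unit_py_spec : Claim_equal_cells_share_unit_py := by
  intro cells _
  unfold Spec_cells_share_unit_py cells_share_unit_py cells_share_unit_py_alt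
  match cells with
  | [] => rfl
  | (r0, c0) :: rest =>
    simp only [if_neg (List.cons_ne_nil _ _), PySem.Set.len, List.map_cons,
      pvScanMM_eq]
    have hrmm := pvMM_eq_iff (rest.map Prod.fst) r0 r0 le_rfl
    have hcmm := pvMM_eq_iff (rest.map Prod.snd) c0 c0 le_rfl
    have hr : ((pvMM r0 r0 (rest.map Prod.fst)).1 = (pvMM r0 r0 (rest.map Prod.fst)).2)
        ↔ ∀ x ∈ rest.map Prod.fst, x = r0 := by
      rw [hrmm]; simp
    have hc : ((pvMM c0 c0 (rest.map Prod.snd)).1 = (pvMM c0 c0 (rest.map Prod.snd)).2)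
        ↔ ∀ x ∈ rest.map Prod.snd, x = c0 := by
      rw [hcmm]; simp
    by_cases hA : ∀ x ∈ rest.map Prod.fst, x = r0
    · have hset : PySem.Set.ofList (r0 :: rest.map (fun p => p.1)) = [r0] := by
        apply pv_ofList_eq_single
        intro x hx
        rcases List.mem_cons.1 hx with h1 | h1
        · exact h1
        · exact hA x (by simpa using h1)
      have hmm : pvMM r0 r0 (rest.map Prod.fst) = (r0, r0) := pvMM_const _ r0 hA
      have harow : (((PySem.Set.ofList (r0 :: rest.map (fun p => p.1))).length : Int) = 1) := by
        rw [hset]; rfl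
      have hbrow : (((pvMM r0 r0 (rest.map Prod.fst)).1 == (pvMM r0 r0 (rest.map Prod.fst)).2) = true) := by
        rw [hmm]; simp
      rw [if_pos harow, if_pos hbrow]
      rw [hset, hmm]; rfl
    · have hset : ¬ (PySem.Set.ofList (r0 :: rest.map (fun p => p.1))).length = 1 := by
        rw [pv_len_one_iff]
        simpa using hA
      have hset' : ¬ (((PySem.Set.ofList (r0 :: rest.map (fun p => p.1))).length : Int) = 1) := by
        exact_mod_cast hset
      have hbrow : ¬ (((pvMM r0 r0 (rest.map Prod.fst)).1 == (pvMM r0 r0 (rest.map Prod.fst)).2) = true) := by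
        rw [beq_iff_eq, hr]; exact hA
      rw [if_neg hset', if_neg hbrow]
      by_cases hB : ∀ x ∈ rest.map Prod.snd, x = c0
      · have hset2 : PySem.Set.ofList (c0 :: rest.map (fun p => p.2)) = [c0] := by
          apply pv_ofList_eq_single
          intro x hx
          rcases List.mem_cons.1 hx with h1 | h1
          · exact h1
          · exact hB x (by simpa using h1)
        have hmm : pvMM c0 c0 (rest.map Prod.snd) = (c0, c0) := pvMM_const _ c0 hB
        have hacol : (((PySem.Set.ofList (c0 :: rest.map (fun p => p.2))).length : Int) = 1) := by
          rw [hset2]; rfl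
        have hbcol : (((pvMM c0 c0 (rest.map Prod.snd)).1 == (pvMM c0 c0 (rest.map Prod.snd)).2) = true) := by
          rw [hmm]; simp
        rw [if_pos hacol, if_pos hbcol]
        rw [hset2, hmm]; rfl
      · have hset2 : ¬ (PySem.Set.ofList (c0 :: rest.map (fun p => p.2))).length = 1 := by
          rw [pv_len_one_iff]
          simpa using hB
        have hset2' : ¬ (((PySem.Set.ofList (c0 :: rest.map (fun p => p.2))).length : Int) = 1) := by
          exact_mod_cast hset2
        have hbcol : ¬ (((pvMM c0 c0 (rest.map Prod.snd)).1 == (pvMM c0 c0 (rest.map Prod.snd)).2) = true) := by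
          rw [beq_iff_eq, hc]; exact hB
        rw [if_neg hset2', if_neg hbcol]
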